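-- pv_equiv track=rewrite | github.com/pypi-data/pypi-mirror-243 | packages/mcfonts/mcfonts-0.7.tar.gz/mcfonts-0.7/mcfonts/providers/bitmap.py | assert_charlist_is_equal
-- ===== SOURCE A (Python) =====
-- def assert_charlist_is_equal(charlist: list[str]) -> tuple[bool, int]:
--     """
--     Ensure that every string inside `charlist` has the same length as the first string.
--
--     >>> assert_charlist_is_equal(["abc","de"])
--     (False, 3)
--     >>> assert_charlist_is_equal(["abc","def"])
--     (True, 3)
--     >>> assert_charlist_is_equal([])
--     (True, 0)
--     >>> assert_charlist_is_equal([""])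
--     (True, 0)
--
--     :param charlist: The charlist of strings to check lengths of.
--     :returns: A tuple of (if the lengths are equal, the expected length).
--     """
--     if len(charlist) == 0:
--         return True, 0
--     ideal = len(max(charlist, key=len))
--     for charline in charlist:
--         if len(charline) != ideal:
--             return False, ideal
--     return True, ideal
-- ===== SOURCE B (Python) =====
-- def assert_charlist_is_equal(charlist: list[str]) -> tuple[bool, int]:
--     lengths = {len(s) for s in charlist}
--     if len(lengths) <= 1:
--         return True, (lengths.pop() if lengths else 0)
--     return False, max(lengths)
-- ===== Notes on version B (the rewrite author's own statement) =====
-- stated objective: idiomatic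
-- what changed: Replaces the pick-max-then-scan-for-mismatch structure with one aggregation into a set of distinct lengths followed by a cardinality test (<=1 means all equal) and max() of the set in the unequal case.
import Mathlib
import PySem

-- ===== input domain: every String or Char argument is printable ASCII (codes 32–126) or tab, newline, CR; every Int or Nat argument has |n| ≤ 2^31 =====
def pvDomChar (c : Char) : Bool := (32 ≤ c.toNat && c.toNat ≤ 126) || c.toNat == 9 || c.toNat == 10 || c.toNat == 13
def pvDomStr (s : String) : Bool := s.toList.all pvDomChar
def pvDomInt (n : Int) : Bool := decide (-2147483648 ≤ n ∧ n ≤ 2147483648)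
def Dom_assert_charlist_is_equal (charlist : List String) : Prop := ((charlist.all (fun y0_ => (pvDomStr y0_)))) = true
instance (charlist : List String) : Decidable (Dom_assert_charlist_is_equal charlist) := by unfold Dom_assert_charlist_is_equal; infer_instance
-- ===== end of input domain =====

-- B replaces A's pick-max-then-scan-for-mismatch with one set of distinct lengths plus a cardinality test (idiomatic, same cost).

-- ===== PORT A =====
-- A's for-loop over charlist with early return
def pvLoopA : List String → Int → Bool × Int
  | [], ideal => (true, ideal)
  | c :: rest, ideal =>
      if PySem.Str.len c ≠ ideal then (false, ideal) else pvLoopA rest ideal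

def assert_charlist_is_equal (charlist : List String) : Bool × Int :=
  if charlist.length = 0 then (true, 0)
  else
    match PySem.List.max? charlist (fun s => PySem.Str.len s) with
    | none => (true, 0)  -- unreachable: charlist is nonempty here
    | some m => pvLoopA charlist (PySem.Str.len m)

-- ===== PORT B =====
def assert_charlist_is_equal_alt (charlist : List String) : Bool × Int :=
  let lengths : PySem.Set Int := PySem.Set.ofList (charlist.map (fun s => PySem.Str.len s))
  if lengths.length ≤ 1 then
    -- lengths.pop() on a set of ≤ 1 elements: its unique element, or 0 if empty
    (true, match lengths with | [] => 0 | x :: _ => x)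
  else
    (false, (PySem.List.max? lengths (fun x => x)).getD 0)

-- ===== PRECONDITION & SPEC =====
def Spec_assert_charlist_is_equal (charlist : List String) (out : Bool × Int) : Prop := out = assert_charlist_is_equal_alt charlist
instance (charlist : List String) (out : Bool × Int) : Decidable (Spec_assert_charlist_is_equal charlist out) := by unfold Spec_assert_charlist_is_equal; infer_instance

-- ===== CLAIM (what is proved, stated in full; the proofs are below) =====
def Claim_equal_assert_charlist_is_equal : Prop := ∀ (charlist : List String), Dom_assert_charlist_is_equal charlist → Spec_assert_charlist_is_equal charlist (assert_charlist_is_equal charlist)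

-- ===== LEMMAS AND PROOFS =====

theorem pvLoopA_all {l : List String} {ideal : Int} (h : ∀ x ∈ l, PySem.Str.len x = ideal) :
    pvLoopA l ideal = (true, ideal) := by
  induction l with
  | nil => rfl
  | cons c t ih =>
      simp only [pvLoopA]
      rw [if_neg (by simpa using h c (by simp))]
      exact ih (fun x hx => h x (by simp [hx]))

theorem pvLoopA_not_all {l : List String} {ideal : Int} (h : ∃ x ∈ l, PySem.Str.len x ≠ ideal) :
    pvLoopA l ideal = (false, ideal) := by
  induction l with
  | nil => simp at h
  | cons c t ih =>
      simp only [pvLoopA]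
      by_cases hc : PySem.Str.len c ≠ ideal
      · rw [if_pos hc]
      · rw [if_neg hc]
        apply ih
        rcases h with ⟨x, hx, hxne⟩
        rcases List.mem_cons.1 hx with hx | hx
        · exact absurd (hx ▸ hxne) hc
        · exact ⟨x, hx, hxne⟩

theorem foldl_add_const {M : Int} : ∀ (l : List Int), (∀ x ∈ l, x = M) →
    l.foldl PySem.Set.add [M] = [M] := by
  intro l
  induction l with
  | nil => intro _; rfl
  | cons a t ih =>
      intro h
      have ha : a = M := h a (by simp)
      subst ha
      have : PySem.Set.add [a] a = [a] := by simp [PySem.Set.add, PySem.Set.contains]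
      simpa [List.foldl, this] using ih (fun x hx => h x (by simp [hx]))

theorem ofList_const {M : Int} {l : List Int} (hne : l ≠ []) (h : ∀ x ∈ l, x = M) :
    PySem.Set.ofList l = [M] := by
  cases l with
  | nil => exact absurd rfl hne
  | cons a t =>
      have ha : a = M := h a (by simp)
      subst ha
      have : PySem.Set.ofList (a :: t) = t.foldl PySem.Set.add [a] := by
        rw [PySem.Set.ofList_eq_foldl]; rfl
      rw [this]
      exact foldl_add_const t (fun x hx => h x (by simp [hx]))

theorem two_le_length {s : List Int} {a b : Int} (ha : a ∈ s) (hb : b ∈ s) (hne : a ≠ b) :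
    ¬ s.length ≤ 1 := by
  match s with
  | [] => simp at ha
  | [x] => simp at ha hb; exact absurd (ha.trans hb.symm) hne
  | x :: y :: t => simp

-- ===== VERDICT (by name: the statement is the Claim_ definition above) =====
theorem assert_charlist_is_equal_spec : Claim_equal_assert_charlist_is_equal := by
  intro charlist _
  unfold Spec_assert_charlist_is_equal assert_charlist_is_equal assert_charlist_is_equal_alt
  cases charlist with
  | nil => rfl
  | cons c t =>
      rw [if_neg (by simp)]
      set xs := c :: t with hxs
      obtain ⟨m, hm⟩ : ∃ m, PySem.List.max? xs (fun s => PySem.Str.len s) = some m := by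
        cases hmax : PySem.List.max? xs (fun s => PySem.Str.len s) with
        | none => exact absurd ((PySem.List.max?_eq_none_iff _ _).1 hmax) (by simp [hxs])
        | some m => exact ⟨m, rfl⟩
      rw [hm]
      set M := PySem.Str.len m with hM
      have hmem : m ∈ xs := PySem.List.max?_mem hm
      have hmax : ∀ y ∈ xs, PySem.Str.len y ≤ M := PySem.List.max?_isMax hm
      have hMl : M ∈ xs.map (fun s => PySem.Str.len s) := List.mem_map.2 ⟨m, hmem, rfl⟩
      by_cases hall : ∀ x ∈ xs, PySem.Str.len x = M
      · -- all lengths equal: A's loop returns true; B's set is the singleton [M]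
        change pvLoopA xs M = _
        rw [pvLoopA_all hall]
        have hconst : ∀ v ∈ xs.map (fun s => PySem.Str.len s), v = M := by
          intro v hv; rcases List.mem_map.1 hv with ⟨x, hx, rfl⟩; exact hall x hx
        have hofl : PySem.Set.ofList (xs.map (fun s => PySem.Str.len s)) = [M] :=
          ofList_const (by simp [hxs]) hconst
        rw [hofl]
        simp
      · -- some length differs: A's loop returns false; B's set has ≥ 2 elements and max M
        push Not at hall
        obtain ⟨x, hx, hxne⟩ := hall
        change pvLoopA xs M = _
        rw [pvLoopA_not_all ⟨x, hx, hxne⟩]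
        have hxl : PySem.Str.len x ∈ xs.map (fun s => PySem.Str.len s) := List.mem_map.2 ⟨x, hx, rfl⟩
        have hMs : M ∈ PySem.Set.ofList (xs.map (fun s => PySem.Str.len s)) :=
          (PySem.Set.mem_ofList _ _).2 hMl
        have hxs' : PySem.Str.len x ∈ PySem.Set.ofList (xs.map (fun s => PySem.Str.len s)) :=
          (PySem.Set.mem_ofList _ _).2 hxl
        have hlen2 := two_le_length hxs' hMs hxne
        rw [if_neg hlen2]
        obtain ⟨m', hm'⟩ : ∃ m', PySem.List.max? (PySem.Set.ofList (xs.map (fun s => PySem.Str.len s))) (fun x => x) = some m' := by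
          cases hmax2 : PySem.List.max? (PySem.Set.ofList (xs.map (fun s => PySem.Str.len s))) (fun x => x) with
          | none =>
              have := (PySem.List.max?_eq_none_iff _ _).1 hmax2
              rw [this] at hMs; simp at hMs
          | some m' => exact ⟨m', rfl⟩
        have hm'M : m' = M := by
          have h1 : M ≤ m' := PySem.List.max?_isMax hm' M hMs
          have hmem' : m' ∈ PySem.Set.ofList (xs.map (fun s => PySem.Str.len s)) := PySem.List.max?_mem hm'
          have hmem'' : m' ∈ xs.map (fun s => PySem.Str.len s) := (PySem.Set.mem_ofList _ _).1 hmem'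
          rcases List.mem_map.1 hmem'' with ⟨y, hy, rfl⟩
          exact le_antisymm (hmax y hy) h1
        rw [hm', hm'M]
        rfl
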